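-- pv_equiv track=rewrite | github.com/polarbear333/heuristic-tetris-DQN | ai_training/rl_agent/utils/training_utils.py | calculate_max_height
-- ===== SOURCE A (Python) =====
-- def calculate_max_height(grid):
--     """Calculate maximum column height in the grid"""
--     heights = []
--     for col in range(len(grid[0])):
--         for row in range(len(grid)):
--             if grid[row][col] != 0:
--                 heights.append(len(grid) - row)
--                 break
--         else:
--             heights.append(0)
--     return max(heights)
-- ===== SOURCE B (Python) =====
-- def calculate_max_height(grid):
--     """Calculate maximum column height in the grid"""
--     width = len(grid[0])
--     for i, row in enumerate(grid):
--         if any(cell != 0 for cell in row[:width]):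
--             return len(grid) - i
--     return 0
-- ===== Notes on version B (the rewrite author's own statement) =====
-- stated objective: simpler
-- what changed: Replaces the column-major double loop that collects per-column heights and takes max() with a single top-down row scan: the max column height is len(grid) minus the index of the topmost row containing a nonzero cell (0 if none).
import Mathlib
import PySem

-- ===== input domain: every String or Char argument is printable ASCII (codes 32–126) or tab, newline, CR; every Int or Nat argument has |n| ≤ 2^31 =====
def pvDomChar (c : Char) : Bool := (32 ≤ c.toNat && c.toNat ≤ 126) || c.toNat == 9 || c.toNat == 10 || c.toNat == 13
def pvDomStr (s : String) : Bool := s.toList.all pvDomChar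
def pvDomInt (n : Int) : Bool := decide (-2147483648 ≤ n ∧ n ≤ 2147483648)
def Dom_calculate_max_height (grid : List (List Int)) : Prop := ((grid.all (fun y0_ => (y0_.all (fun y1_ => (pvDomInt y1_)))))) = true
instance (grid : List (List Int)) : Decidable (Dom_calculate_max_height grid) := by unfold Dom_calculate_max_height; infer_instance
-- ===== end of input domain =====

-- B replaces A's column-major double loop + max() with a single top-down row scan; objective: simpler.

-- ===== PORT A =====
-- inner loop of A: scan rows (rs is grid's suffix starting at index `row`) for the
-- first nonzero cell in column `col`; on hit append n - row, else (for-else) 0.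
-- Pre_ guarantees every grid[row][col] A actually reads is in range, so .getD 0 is exact there.
def pvA_col (n : Nat) (col : Nat) : List (List Int) → Nat → Int
  | [], _ => 0
  | r :: rs, row =>
      if (PySem.List.pyGet? r (Int.ofNat col)).getD 0 ≠ 0 then (n : Int) - row
      else pvA_col n col rs (row + 1)

def calculate_max_height (grid : List (List Int)) : Int :=
  let heights := (List.range grid.headI.length).map (fun col => pvA_col grid.length col grid 0)
  -- Python's max(heights); max([]) raises ValueError, excluded by Pre_ (0 is a dummy)
  (PySem.List.max? heights (fun x => x)).getD 0

-- ===== PORT B =====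
-- B: scan rows from the top; first row with a nonzero cell among the first `width`
-- cells gives len(grid) - i; if none, 0.  (row[:width] → List.take width)
def pvB_scan (n w : Nat) : List (List Int) → Nat → Int
  | [], _ => 0
  | r :: rs, i =>
      if (r.take w).any (fun c => c ≠ 0) then (n : Int) - i
      else pvB_scan n w rs (i + 1)

def calculate_max_height_alt (grid : List (List Int)) : Int :=
  pvB_scan grid.length grid.headI.length grid 0

-- ===== PRECONDITION & SPEC =====
-- Pre_ is exactly where A returns normally: the grid is nonempty (else grid[0] raises
-- IndexError), its first row is nonempty (else max([]) raises ValueError), and every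
-- row shorter than the first row is "masked": each column scan reaching it would have
-- stopped earlier at a nonzero cell (otherwise grid[row][col] raises IndexError).
def Pre_calculate_max_height (grid : List (List Int)) : Prop :=
  grid ≠ [] ∧ grid.headI ≠ [] ∧
    ∀ col < grid.headI.length, ∀ j < grid.length,
      (grid.getD j []).length ≤ col →
        ∃ k < j, col < (grid.getD k []).length ∧ (grid.getD k []).getD col 0 ≠ 0
instance (grid : List (List Int)) : Decidable (Pre_calculate_max_height grid) := by
  unfold Pre_calculate_max_height; infer_instance

def pvWitness_calculate_max_height : List (List Int) := [[0, 1], [2, 0]]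

def Spec_calculate_max_height (grid : List (List Int)) (out : Int) : Prop := out = calculate_max_height_alt grid
instance (grid : List (List Int)) (out : Int) : Decidable (Spec_calculate_max_height grid out) := by unfold Spec_calculate_max_height; infer_instance

-- ===== CLAIM (what is proved, stated in full; the proofs are below) =====
def Claim_equal_calculate_max_height : Prop := ∀ (grid : List (List Int)), Dom_calculate_max_height grid → Pre_calculate_max_height grid → Spec_calculate_max_height grid (calculate_max_height grid)

-- ===== LEMMAS AND PROOFS =====

-- the masking condition of Pre_, stated for a suffix of the grid
def pvMasked (w : Nat) (rs : List (List Int)) : Prop :=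
  ∀ col < w, ∀ j < rs.length,
    (rs.getD j []).length ≤ col →
      ∃ k < j, col < (rs.getD k []).length ∧ (rs.getD k []).getD col 0 ≠ 0

-- every per-column height is at most the number of remaining rows (= n - row)
theorem pvA_col_le (n col : Nat) (rs : List (List Int)) (row : Nat)
    (h : row + rs.length = n) : pvA_col n col rs row ≤ (n : Int) - row := by
  induction rs generalizing row with
  | nil => simp [pvA_col]; omega
  | cons r rs ih =>
    simp only [pvA_col]
    split
    · omega
    · have := ih (row + 1) (by simp at h ⊢; omega)
      omega

theorem max?_of_mem_of_le (l : List Int) (M : Int) (hM : M ∈ l)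
    (hle : ∀ x ∈ l, x ≤ M) : PySem.List.max? l (fun x => x) = some M := by
  cases hmx : PySem.List.max? l (fun x => x) with
  | none =>
      have : l = [] := (PySem.List.max?_eq_none_iff _ _).mp hmx
      simp [this] at hM
  | some m =>
      have hmem := PySem.List.max?_mem hmx
      have h1 : M ≤ m := PySem.List.max?_isMax hmx M hM
      have h2 : m ≤ M := hle m hmem
      have : m = M := le_antisymm h2 h1
      simp [this]

-- pyGet? on a nonneg in-range index is just getElem
theorem pyGet?_getD_eq (r : List Int) (col : Nat) (h : col < r.length) :
    (PySem.List.pyGet? r (Int.ofNat col)).getD 0 = r[col] := by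
  simp [PySem.List.pyGet?, PySem.List.pyIdx?, h]

-- a row with no nonzero among its first w cells, provided it is at least w wide
theorem row_all_zero {r : List Int} {w : Nat}
    (hhit : ¬ (r.take w).any (fun c => c ≠ 0)) (hr : w ≤ r.length) :
    ∀ c < w, (PySem.List.pyGet? r (Int.ofNat c)).getD 0 = 0 := by
  intro c hc
  have hcr : c < r.length := lt_of_lt_of_le hc hr
  rw [pyGet?_getD_eq r c hcr]
  by_contra hne
  apply hhit
  simp only [List.any_eq_true, decide_eq_true_eq]
  refine ⟨r[c], ?_, hne⟩
  have : (r.take w)[c]'(by simp; omega) = r[c] := List.getElem_take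
  rw [← this]; exact List.getElem_mem _

-- an unmasked top row must be at least w wide
theorem top_row_wide {r : List Int} {rs : List (List Int)} {w : Nat}
    (hm : pvMasked w (r :: rs)) : w ≤ r.length := by
  by_contra hlt
  push Not at hlt
  obtain ⟨k, hk, _⟩ := hm r.length hlt 0 (by simp) (by simp)
  omega

-- main invariant: the max of the per-column heights over a suffix rs (starting at
-- absolute row index i, with i + |rs| = n) equals B's top-down scan of rs
theorem pvA_max_eq_pvB (n w : Nat) (hw : 0 < w) (rs : List (List Int)) (i : Nat)
    (hlen : i + rs.length = n) (hm : pvMasked w rs) :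
    PySem.List.max? ((List.range w).map (fun col => pvA_col n col rs i)) (fun x => x)
      = some (pvB_scan n w rs i) := by
  induction rs generalizing i with
  | nil =>
      apply max?_of_mem_of_le
      · simp [pvB_scan, pvA_col]
        omega
      · intro x hx
        simp [pvA_col] at hx
        simp [pvB_scan, hx]
  | cons r rs ih =>
      by_cases hhit : (r.take w).any (fun c => c ≠ 0)
      · -- some cell of r among the first w is nonzero: B returns n - i
        simp only [pvB_scan, if_pos hhit]
        apply max?_of_mem_of_le
        · -- the hitting column contributes exactly n - i
          simp only [List.any_eq_true, decide_eq_true_eq] at hhit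
          obtain ⟨c, hcmem, hcne⟩ := hhit
          obtain ⟨j, hj, hjc⟩ := List.getElem_of_mem hcmem
          have hjw : j < w := by
            have : j < (r.take w).length := hj
            simp at this; omega
          have hjr : j < r.length := by
            have : j < (r.take w).length := hj
            simp at this; omega
          have hget : (r.take w)[j] = r[j] := List.getElem_take
          refine List.mem_map.mpr ⟨j, List.mem_range.mpr hjw, ?_⟩
          simp only [pvA_col]
          rw [if_pos]
          rw [pyGet?_getD_eq r j hjr, ← hget, hjc]; exact hcne
        · intro x hx
          obtain ⟨c, hc, hcx⟩ := List.mem_map.mp hx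
          have := pvA_col_le n c (r :: rs) i (by simpa using hlen)
          omega
      · -- top row all zero among first w columns: every column defers to the tail
        have hr : w ≤ r.length := top_row_wide hm
        have hz := row_all_zero hhit hr
        have hmap : ((List.range w).map (fun col => pvA_col n col (r :: rs) i))
            = ((List.range w).map (fun col => pvA_col n col rs (i + 1))) := by
          apply List.map_congr_left
          intro c hc
          have hcw := List.mem_range.mp hc
          simp only [pvA_col, hz c hcw]
          simp
        have hm' : pvMasked w rs := by
          intro col hcol j hj hshort
          obtain ⟨k, hk, hklen, hkne⟩ := hm col hcol (j + 1) (by simp; omega) (by simpa using hshort)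
          cases k with
          | zero =>
              exfalso
              simp only [List.getD_cons_zero] at hklen hkne
              have : (PySem.List.pyGet? r (Int.ofNat col)).getD 0 = 0 := hz col hcol
              rw [pyGet?_getD_eq r col hklen] at this
              rw [List.getD_eq_getElem r 0 hklen] at hkne
              exact hkne this
          | succ k' =>
              exact ⟨k', by omega, by simpa using hklen, by simpa using hkne⟩
        rw [hmap, ih (i + 1) (by simp at hlen ⊢; omega) hm']
        simp only [pvB_scan, if_neg hhit]

-- ===== VERDICT (by name: the statement is the Claim_ definition above) =====
theorem calculate_max_height_spec : Claim_equal_calculate_max_height := by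
  intro grid _ hpre
  obtain ⟨hne, hhd, hrows⟩ := hpre
  unfold Spec_calculate_max_height calculate_max_height calculate_max_height_alt
  simp only []
  have hw : 0 < grid.headI.length := List.length_pos_iff.mpr hhd
  rw [pvA_max_eq_pvB grid.length grid.headI.length hw grid 0 (by simp) hrows]
  rfl
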